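-- pv_equiv track=rewrite | github.com/cthacker-udel/Python-practice | codewars.py | get_length_of_missing_array
-- ===== SOURCE A (Python) =====
-- def get_length_of_missing_array(array_of_arrays):
--
--     lens = sorted([len(x) if x != None else 0 for x in array_of_arrays])
--     if len(lens) == 0 or 0 in lens:
--         return 0
--     for i in range(len(lens)):
--         eachnumber = lens[i]
--         if i == (len(lens) - 1):
--             return 0
--         elif eachnumber + 1 not in lens:
--             return eachnumber + 1
-- ===== SOURCE B (Python) =====
-- def get_length_of_missing_array(array_of_arrays):
--     lengths = [0 if x is None else len(x) for x in array_of_arrays]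
--     present = set(lengths)
--     if not lengths or 0 in present:
--         return 0
--     k = min(lengths)
--     while k + 1 in present:
--         k += 1
--     return 0 if k == max(lengths) else k + 1
-- ===== Notes on version B (the rewrite author's own statement) =====
-- stated objective: alternative
-- what changed: Replaces A's sort plus per-index linear 'in lens' scans with a one-pass set of lengths and a set-membership climb from the minimum length (no sort, no inner list scans).
-- intended difference: On inputs whose lengths (0 excluded, list nonempty) form a complete run from min to max with the maximum length duplicated, A returns max+1 (its sorted scan never treats a duplicated last element as the end) while B returns 0, the intended 'nothing missing' answer when no length is absent from the run. — e.g. on get_length_of_missing_array([some [5], some [7]]): A returns 2, B returns 0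
import Mathlib
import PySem

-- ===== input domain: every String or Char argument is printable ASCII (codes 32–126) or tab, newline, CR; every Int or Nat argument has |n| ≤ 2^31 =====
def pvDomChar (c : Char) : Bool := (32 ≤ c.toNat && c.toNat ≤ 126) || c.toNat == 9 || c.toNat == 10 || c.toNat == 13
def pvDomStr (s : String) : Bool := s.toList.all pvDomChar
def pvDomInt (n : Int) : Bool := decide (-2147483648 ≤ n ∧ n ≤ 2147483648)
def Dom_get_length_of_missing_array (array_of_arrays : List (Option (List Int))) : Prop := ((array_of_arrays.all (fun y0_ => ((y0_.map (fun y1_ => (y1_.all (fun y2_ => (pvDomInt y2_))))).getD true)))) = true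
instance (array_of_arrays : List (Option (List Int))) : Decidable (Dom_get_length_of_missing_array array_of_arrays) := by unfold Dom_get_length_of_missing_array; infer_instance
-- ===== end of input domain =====

-- B replaces A's sort + per-index linear `in lens` scans by a one-pass set of lengths
-- and a set-membership climb from the minimum length (objective: alternative algorithm);
-- on a complete run of lengths with a duplicated maximum the two differ (see D_ below).

-- ===== PORT A =====
-- the for-loop over range(len(lens)); each early `return` is a branch result.
-- The `else 0` fall-off (Python's implicit None) is unreachable: started at 0 on a
-- nonempty lens, the `i == len(lens) - 1` branch always returns first.
def pvLoopA (lens : List Int) (i : Nat) : Int :=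
  if h : i < lens.length then
    if i = lens.length - 1 then 0
    else if lens[i] + 1 ∉ lens then lens[i] + 1
    else pvLoopA lens (i + 1)
  else 0
termination_by lens.length - i

def get_length_of_missing_array (array_of_arrays : List (Option (List Int))) : Int :=
  let lens := PySem.List.sorted
    (array_of_arrays.map (fun x => match x with | some l => (l.length : Int) | none => 0))
    (fun v => v) false
  if lens.length = 0 ∨ (0 : Int) ∈ lens then 0
  else pvLoopA lens 0

-- ===== PORT B =====
-- termination measure for the while-loop: the number of set members above k shrinks
theorem pvClimb_measure {l : List Int} {k : Int} (h : k + 1 ∈ l) :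
    (l.filter (fun v => decide (k + 1 < v))).length < (l.filter (fun v => decide (k < v))).length := by
  have mono : ∀ t : List Int, (t.filter (fun v => decide (k + 1 < v))).length ≤ (t.filter (fun v => decide (k < v))).length := by
    intro t
    rw [← List.countP_eq_length_filter, ← List.countP_eq_length_filter]
    exact List.countP_mono_left (fun a _ ha => by simp at ha ⊢; omega)
  induction l with
  | nil => cases h
  | cons a t ih =>
    rcases List.mem_cons.mp h with ha | ht
    · subst ha
      simp only [List.filter_cons]
      rw [if_neg (by simp), if_pos (by simp)]
      exact Nat.lt_succ_of_le (mono t)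
    · have := ih ht
      simp only [List.filter_cons]
      split <;> split <;> (simp_all; try omega)

-- the `while k + 1 in present: k += 1` loop
def pvClimb (present : PySem.Set Int) (k : Int) : Int :=
  if h : (k + 1) ∈ present then pvClimb present (k + 1) else k
termination_by (present.filter (fun v => decide (k < v))).length
decreasing_by exact pvClimb_measure h

def get_length_of_missing_array_alt (array_of_arrays : List (Option (List Int))) : Int :=
  let lengths := array_of_arrays.map (fun x => match x with | none => 0 | some l => (l.length : Int))
  let present := PySem.Set.ofList lengths
  if lengths = [] ∨ (0 : Int) ∈ present then 0
  else
    -- lengths ≠ [] here, so min?/max? are `some`; the .getD defaults are unreachable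
    let k := pvClimb present ((PySem.List.min? lengths (fun v => v)).getD 0)
    if k = (PySem.List.max? lengths (fun v => v)).getD 0 then 0 else k + 1

-- ===== PRECONDITION & SPEC =====
-- On inputs whose lengths (list nonempty, 0 absent) form a complete run from min to max
-- with the maximum length duplicated, A returns max+1 (its sorted scan never treats a
-- duplicated last element as the end) while B returns 0, the intended 'nothing missing'
-- answer when no length is absent from the run.
-- the (Nat) length an entry contributes, None counting as the empty array
def pvALen (x : Option (List Int)) : Nat := (x.getD []).length
def D_get_length_of_missing_array (array_of_arrays : List (Option (List Int))) : Prop :=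
  let L := array_of_arrays.map pvALen
  L ≠ [] ∧ 0 ∉ L ∧ ∀ n ∈ L, n + 1 ∈ L ∨ (∀ k ∈ L, k ≤ n) ∧ 1 < L.count n
instance (array_of_arrays : List (Option (List Int))) : Decidable (D_get_length_of_missing_array array_of_arrays) := by unfold D_get_length_of_missing_array; infer_instance

def Spec_get_length_of_missing_array (array_of_arrays : List (Option (List Int))) (out : Int) : Prop := ¬ D_get_length_of_missing_array array_of_arrays → out = get_length_of_missing_array_alt array_of_arrays
instance (array_of_arrays : List (Option (List Int))) (out : Int) : Decidable (Spec_get_length_of_missing_array array_of_arrays out) := by unfold Spec_get_length_of_missing_array; infer_instance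

def pvDiffWitness_get_length_of_missing_array : List (Option (List Int)) := [some [5], some [7]]
def pvDiffWitnessOut_get_length_of_missing_array : Int × Int := (2, 0)

-- ===== CLAIM (what is proved, stated in full; the proofs are below) =====
def Claim_unchanged_get_length_of_missing_array : Prop := ∀ (array_of_arrays : List (Option (List Int))), Dom_get_length_of_missing_array array_of_arrays → Spec_get_length_of_missing_array array_of_arrays (get_length_of_missing_array array_of_arrays)
def Claim_changed_get_length_of_missing_array : Prop := Dom_get_length_of_missing_array (pvDiffWitness_get_length_of_missing_array) ∧ D_get_length_of_missing_array (pvDiffWitness_get_length_of_missing_array) ∧ get_length_of_missing_array (pvDiffWitness_get_length_of_missing_array) = pvDiffWitnessOut_get_length_of_missing_array.1 ∧ get_length_of_missing_array_alt (pvDiffWitness_get_length_of_missing_array) = pvDiffWitnessOut_get_length_of_missing_array.2 ∧ pvDiffWitnessOut_get_length_of_missing_array.1 ≠ pvDiffWitnessOut_get_length_of_missing_array.2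
def Claim_exact_get_length_of_missing_array : Prop := ∀ (array_of_arrays : List (Option (List Int))), Dom_get_length_of_missing_array array_of_arrays → D_get_length_of_missing_array array_of_arrays → get_length_of_missing_array array_of_arrays ≠ get_length_of_missing_array_alt array_of_arrays

-- ===== LEMMAS AND PROOFS =====

-- proof-side abbreviation for the ports' lengths list, and the bridge from D_'s
-- per-element statement to the lengths-list statement the evaluation lemmas use
def pvLens (array_of_arrays : List (Option (List Int))) : List Int :=
  array_of_arrays.map (fun x => match x with | none => 0 | some l => (l.length : Int))

theorem pvCastFun : (fun x : Option (List Int) => match x with | none => 0 | some l => (l.length : Int))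
    = (fun e : Option (List Int) => ((pvALen e : Nat) : Int)) :=
  funext fun e => by cases e <;> rfl

theorem pvCastLens (array_of_arrays : List (Option (List Int))) :
    pvLens array_of_arrays = (array_of_arrays.map pvALen).map (fun n : Nat => (n : Int)) := by
  rw [pvLens, pvCastFun, List.map_map]; rfl

theorem pvMemCast (array_of_arrays : List (Option (List Int))) (n : Nat) :
    (n : Int) ∈ pvLens array_of_arrays ↔ n ∈ array_of_arrays.map pvALen := by
  rw [pvCastLens]
  exact List.mem_map_of_injective (fun a b => by omega)

theorem pvD_iff (array_of_arrays : List (Option (List Int))) :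
    D_get_length_of_missing_array array_of_arrays ↔
      (pvLens array_of_arrays ≠ [] ∧ (0 : Int) ∉ pvLens array_of_arrays ∧
        ∀ x ∈ pvLens array_of_arrays, x + 1 ∈ pvLens array_of_arrays ∨
          ((∀ y ∈ pvLens array_of_arrays, y ≤ x) ∧ 1 < (pvLens array_of_arrays).count x)) := by
  have hcnt : ∀ n : Nat, (pvLens array_of_arrays).count (n : Int) = (array_of_arrays.map pvALen).count n := by
    intro n
    rw [pvCastLens]
    exact List.count_map_of_injective _ _ (fun a b => by omega) n
  constructor
  · rintro ⟨h1, h2, h3⟩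
    refine ⟨?_, ?_, ?_⟩
    · intro h
      exact h1 (by rw [pvCastLens] at h; exact List.map_eq_nil_iff.mp h)
    · intro h0
      exact h2 ((pvMemCast _ 0).mp h0)
    · intro x hx
      rw [pvCastLens] at hx
      obtain ⟨n, hn, rfl⟩ := List.mem_map.mp hx
      rcases h3 n hn with hsucc | ⟨hmx, hc⟩
      · exact Or.inl ((pvMemCast _ (n + 1)).mpr hsucc)
      · refine Or.inr ⟨?_, ?_⟩
        · intro y hy
          rw [pvCastLens] at hy
          obtain ⟨k, hk, rfl⟩ := List.mem_map.mp hy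
          exact_mod_cast hmx k hk
        · rw [hcnt]; exact_mod_cast hc
  · rintro ⟨h1, h2, h3⟩
    refine ⟨fun h => h1 (by rw [pvCastLens, h]; rfl), ?_, ?_⟩
    · intro h0
      exact h2 ((pvMemCast _ 0).mpr h0)
    · intro n hn
      rcases h3 (n : Int) ((pvMemCast _ n).mpr hn) with hsucc | ⟨hmx, hc⟩
      · refine Or.inl ((pvMemCast _ (n + 1)).mp ?_)
        push_cast
        exact hsucc
      · refine Or.inr ⟨?_, ?_⟩
        · intro k hk
          exact_mod_cast hmx (k : Int) ((pvMemCast _ k).mpr hk)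
        · rw [← hcnt]; exact_mod_cast hc

theorem pvClimb_eq (S : PySem.Set Int) (k : Int) :
    pvClimb S k = if (k + 1) ∈ S then pvClimb S (k + 1) else k := by
  rw [pvClimb]; split <;> simp_all

theorem pvClimb_mem (S : PySem.Set Int) (k : Int) (hk : k ∈ S) : pvClimb S k ∈ S := by
  rw [pvClimb_eq]
  split
  · exact pvClimb_mem S (k + 1) (by assumption)
  · exact hk
termination_by (S.filter (fun v => decide (k < v))).length
decreasing_by exact pvClimb_measure (by assumption)

theorem pvClimb_stop (S : PySem.Set Int) (k : Int) : pvClimb S k + 1 ∉ S := by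
  rw [pvClimb_eq]
  split
  · exact pvClimb_stop S (k + 1)
  · assumption
termination_by (S.filter (fun v => decide (k < v))).length
decreasing_by exact pvClimb_measure (by assumption)

theorem pvClimb_covers (S : PySem.Set Int) (k j : Int) (h1 : k < j) (h2 : j ≤ pvClimb S k) : j ∈ S := by
  rw [pvClimb_eq] at h2
  by_cases h : (k + 1) ∈ S
  · rw [if_pos h] at h2
    rcases eq_or_lt_of_le (Int.add_one_le_iff.mpr h1 : k + 1 ≤ j) with he | hlt
    · exact he ▸ h
    · exact pvClimb_covers S (k + 1) j hlt h2
  · rw [if_neg h] at h2; omega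
termination_by (S.filter (fun v => decide (k < v))).length
decreasing_by exact pvClimb_measure h

-- B's tail after the climb, phrased over the sorted list L (for any S with the same members)
def pvFinish (S L : List Int) (k : Int) : Int :=
  let k' := pvClimb S k
  if (∀ y ∈ L, y ≤ k') ∧ L.count k' = 1 then 0 else k' + 1

theorem pvFinish_succ (S L : List Int) (k : Int) (h : (k+1) ∈ S) :
    pvFinish S L k = pvFinish S L (k+1) := by
  unfold pvFinish
  rw [pvClimb_eq S k, if_pos h]

-- the key lemma: A's index loop, at a "reachable" index i, returns exactly the
-- climb-and-finish value started from L[i]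
theorem loopA_eq_finish (L S : List Int) (hmem : ∀ x : Int, x ∈ S ↔ x ∈ L)
    (hs : L.Pairwise (· ≤ ·)) :
    ∀ n i, L.length - i = n → i < L.length →
      (i = 0 ∨ L.getD (i - 1) 0 + 1 ∈ L) →
      pvLoopA L i = pvFinish S L (L.getD i 0) := by
  have pw := List.pairwise_iff_getElem.mp hs
  intro n
  induction n using Nat.strong_induction_on with
  | _ n ih =>
  intro i hn hi hreach
  have hgd : L.getD i 0 = L[i] := List.getD_eq_getElem L 0 hi
  rw [hgd]
  by_cases hk1 : (L[i] + 1) ∈ L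
  · -- successor present: A continues, B's climb steps
    obtain ⟨j, hj, hLj⟩ := List.mem_iff_getElem.mp hk1
    have hij : i < j := by
      rcases Nat.lt_trichotomy j i with h' | h' | h'
      · have := pw j i hj hi h'; omega
      · subst h'; omega
      · exact h'
    have hilast : i ≠ L.length - 1 := by omega
    have hi1 : i + 1 < L.length := by omega
    rw [pvLoopA, dif_pos hi, if_neg hilast, if_neg (by simpa using hk1)]
    have hreach' : i + 1 = 0 ∨ L.getD (i + 1 - 1) 0 + 1 ∈ L := by
      right; simp only [Nat.add_sub_cancel]; rw [hgd]; exact hk1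
    have := ih (L.length - (i+1)) (by omega) (i+1) rfl hi1 hreach'
    rw [this, List.getD_eq_getElem L 0 hi1]
    have hle : L[i] ≤ L[i+1] := pw i (i+1) hi hi1 (by omega)
    have hub : L[i+1] ≤ L[i] + 1 := by
      rcases Nat.lt_or_ge (i+1) j with h' | h'
      · have := pw (i+1) j hi1 hj h'; omega
      · have : j = i + 1 := by omega
        subst this; omega
    rcases (by omega : L[i+1] = L[i] ∨ L[i+1] = L[i] + 1) with he | he
    · rw [he]
    · rw [he, pvFinish_succ S L L[i] ((hmem _).mpr hk1)]
  · -- successor absent: B's climb stops at L[i]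
    have hstop : pvClimb S L[i] = L[i] := by
      rw [pvClimb_eq, if_neg (fun h => hk1 ((hmem _).mp h))]
    by_cases hlast : i = L.length - 1
    · -- last index: A returns 0; the finish condition holds
      rw [pvLoopA, dif_pos hi, if_pos hlast]
      have hmax : ∀ y ∈ L, y ≤ L[i] := by
        intro y hy
        obtain ⟨j, hj, rfl⟩ := List.mem_iff_getElem.mp hy
        rcases Nat.lt_trichotomy j i with h' | h' | h'
        · exact pw j i hj hi h'
        · subst h'; exact le_refl _
        · omega
      -- every index strictly before i carries a value < L[i]
      have hbefore : ∀ j (hj : j < L.length), j < i → L[j] < L[i] := by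
        intro j hj hji
        rcases hreach with h0 | hpred
        · omega
        · have hi1' : i - 1 < L.length := by omega
          have hpred' : L[i-1] + 1 ∈ L := by
            rwa [List.getD_eq_getElem L 0 hi1'] at hpred
          have h1 : L[i-1] ≤ L[i] := by
            rcases Nat.eq_or_lt_of_le (Nat.le_of_lt_succ (by omega : i - 1 < i + 1)) with h' | h'
            · omega
            · exact pw (i-1) i hi1' hi (by omega)
          have h2 : L[i-1] ≠ L[i] := by
            intro he; rw [he] at hpred'; exact hk1 hpred'
          have h3 : L[j] ≤ L[i-1] := by
            rcases Nat.lt_trichotomy j (i-1) with h' | h' | h'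
            · exact pw j (i-1) hj hi1' h'
            · subst h'; exact le_refl _
            · omega
          omega
      have hcount : List.count L[i] L = 1 := by
        have hdrop : L.drop i = [L[i]] := by
          rw [List.drop_eq_getElem_cons hi]
          have h0 : L.drop (i+1) = [] := List.drop_eq_nil_of_le (by omega)
          rw [h0]
        have htake : L[i] ∉ L.take i := by
          intro hmem'
          obtain ⟨j, hj, hLj⟩ := List.mem_iff_getElem.mp hmem'
          have hjlen : j < i := lt_of_lt_of_le hj (List.length_take_le i L)
          have hjL : j < L.length := by omega
          have := hbefore j hjL hjlen
          rw [List.getElem_take] at hLj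
          omega
        calc List.count L[i] L
            = List.count L[i] (L.take i ++ L.drop i) := by rw [List.take_append_drop]
          _ = List.count L[i] (L.take i) + List.count L[i] (L.drop i) := by
              rw [List.count_append]
          _ = 0 + 1 := by rw [List.count_eq_zero.mpr htake, hdrop]; simp
          _ = 1 := by omega
      simp only [pvFinish, hstop]
      rw [if_pos (And.intro hmax hcount)]
    · -- not last: A returns L[i]+1; the finish condition fails
      rw [pvLoopA, dif_pos hi, if_neg hlast, if_pos (by simpa using hk1)]
      have hi1 : i + 1 < L.length := by omega
      have hle : L[i] ≤ L[i+1] := pw i (i+1) hi hi1 (by omega)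
      have hcond : ¬ ((∀ y ∈ L, y ≤ L[i]) ∧ List.count L[i] L = 1) := by
        rintro ⟨hmax, hcount⟩
        have h2 : L[i+1] ≤ L[i] := hmax _ (List.getElem_mem hi1)
        have heq : L[i+1] = L[i] := le_antisymm h2 hle
        have hsplit : L.drop i = L[i] :: L[i+1] :: L.drop (i+2) := by
          rw [List.drop_eq_getElem_cons hi, List.drop_eq_getElem_cons hi1]
        have h3 : 2 ≤ List.count L[i] (L.drop i) := by
          rw [hsplit, heq]; simp
        have h4 : List.count L[i] (L.drop i) ≤ List.count L[i] L :=
          (List.drop_sublist i L).count_le L[i]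
        omega
      simp only [pvFinish, hstop]
      rw [if_neg hcond]

-- both guards fire together: empty input or a zero length makes both programs return 0
theorem pv_guard (array_of_arrays : List (Option (List Int)))
    (hg : pvLens array_of_arrays = [] ∨ (0 : Int) ∈ pvLens array_of_arrays) :
    get_length_of_missing_array array_of_arrays = 0 ∧
    get_length_of_missing_array_alt array_of_arrays = 0 := by
  have hfun : (fun x : Option (List Int) => match x with | some l => (l.length : Int) | none => 0)
            = (fun x : Option (List Int) => match x with | none => 0 | some l => (l.length : Int)) := by
    funext x; cases x <;> rfl
  have hlen : pvLens array_of_arrays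
      = array_of_arrays.map (fun x => match x with | none => 0 | some l => (l.length : Int)) := rfl
  rw [hlen] at hg
  have hperm := PySem.List.sorted_perm
    (array_of_arrays.map (fun x => match x with | none => 0 | some l => (l.length : Int)))
    (fun v => v) false
  constructor
  · unfold get_length_of_missing_array
    simp only [hfun]
    rw [if_pos ?_]
    rcases hg with h | h
    · left; rw [hperm.length_eq, h]; rfl
    · right; exact hperm.mem_iff.mpr h
  · unfold get_length_of_missing_array_alt
    rw [if_pos ?_]
    rcases hg with h | h
    · exact Or.inl h
    · exact Or.inr ((PySem.Set.mem_ofList _ _).mpr h)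

-- the central evaluation lemma: on a nonempty, 0-free lengths list, both programs'
-- values written in terms of the climb result k' = pvClimb S (min lengths)
theorem pv_core (array_of_arrays : List (Option (List Int)))
    (lengths : List Int)
    (hlen : lengths = array_of_arrays.map (fun x => match x with | none => 0 | some l => (l.length : Int)))
    (hne : lengths ≠ []) (h0 : (0 : Int) ∉ lengths)
    (m M : Int) (hm : PySem.List.min? lengths (fun v => v) = some m)
    (hM : PySem.List.max? lengths (fun v => v) = some M) :
    get_length_of_missing_array array_of_arrays =
      (if (∀ y ∈ lengths, y ≤ pvClimb (PySem.Set.ofList lengths) m) ∧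
          PySem.List.count lengths (pvClimb (PySem.Set.ofList lengths) m) = 1 then 0
       else pvClimb (PySem.Set.ofList lengths) m + 1) ∧
    get_length_of_missing_array_alt array_of_arrays =
      (if pvClimb (PySem.Set.ofList lengths) m = M then 0
       else pvClimb (PySem.Set.ofList lengths) m + 1) := by
  have hfun : (fun x : Option (List Int) => match x with | some l => (l.length : Int) | none => 0)
            = (fun x : Option (List Int) => match x with | none => 0 | some l => (l.length : Int)) := by
    funext x; cases x <;> rfl
  set L := PySem.List.sorted lengths (fun v => v) false with hL
  set S := PySem.Set.ofList lengths with hS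
  have hperm : L.Perm lengths := PySem.List.sorted_perm lengths (fun v => v) false
  have hmemL : ∀ x : Int, x ∈ L ↔ x ∈ lengths := fun x => hperm.mem_iff
  have hmemS : ∀ x : Int, x ∈ S ↔ x ∈ L := by
    intro x; rw [hS, PySem.Set.mem_ofList, hmemL]
  have hLne : L ≠ [] := by
    intro h
    apply hne
    have hlen' := hperm.length_eq
    rw [h] at hlen'
    exact List.eq_nil_of_length_eq_zero hlen'.symm
  constructor
  · -- A's value
    unfold get_length_of_missing_array
    simp only [hfun, ← hlen, ← hL]
    have hguard : ¬ (L.length = 0 ∨ (0 : Int) ∈ L) := by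
      rintro (h | h)
      · exact hLne (List.eq_nil_of_length_eq_zero h)
      · exact h0 ((hmemL 0).mp h)
    rw [if_neg hguard]
    have hs : L.Pairwise (· ≤ ·) := PySem.List.sorted_pairwise lengths (fun v => v)
    have hLen0 : 0 < L.length := List.length_pos_of_ne_nil hLne
    have hhead : L.getD 0 0 = m := by
      cases hLcons : L with
      | nil => exact absurd hLcons hLne
      | cons a t =>
        have h1 : ∀ y ∈ lengths, a ≤ y := by
          have := PySem.List.key_head_sorted_le (xs := lengths) (key := fun v => v) (m := a) (t := t) (by rw [← hL, hLcons])
          simpa using this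
        have h2 : ∀ y ∈ lengths, m ≤ y := by
          have := PySem.List.min?_isMin hm
          simpa using this
        have ha : a ∈ lengths := (hmemL a).mp (by rw [hLcons]; exact List.mem_cons_self)
        have hmm : m ∈ lengths := PySem.List.min?_mem hm
        simp only [List.getD_cons_zero]
        exact le_antisymm (h1 m hmm) (h2 a ha)
    have hkey := loopA_eq_finish L S hmemS hs L.length 0 (by omega) hLen0 (Or.inl rfl)
    rw [hkey, hhead]
    simp only [pvFinish]
    have hall : (∀ y ∈ L, y ≤ pvClimb S m) ↔ (∀ y ∈ lengths, y ≤ pvClimb S m) := by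
      constructor <;> intro h y hy
      · exact h y ((hmemL y).mpr hy)
      · exact h y ((hmemL y).mp hy)
    have hcnt : List.count (pvClimb S m) L = PySem.List.count lengths (pvClimb S m) := by
      rw [PySem.List.count_eq, hperm.count_eq]
    exact if_congr (and_congr hall (by rw [hcnt])) rfl rfl
  · -- B's value
    unfold get_length_of_missing_array_alt
    simp only [← hlen, ← hS]
    have hguard : ¬ (lengths = [] ∨ (0 : Int) ∈ S) := by
      rintro (h | h)
      · exact hne h
      · exact h0 ((hmemL 0).mp ((hmemS 0).mp h))
    rw [if_neg hguard, hm, hM]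
    rfl

theorem pv_lengths_nonneg (array_of_arrays : List (Option (List Int))) (x : Int)
    (hx : x ∈ pvLens array_of_arrays) : 0 ≤ x := by
  obtain ⟨y, _, rfl⟩ := List.mem_map.mp hx
  cases y <;> simp

-- witness evaluations (the ports are well-founded recursions, so `decide` alone
-- cannot unfold them; step them once by their equations, then decide)
theorem pvA_w : get_length_of_missing_array [some [5], some [7]] = 2 := by
  have hs : PySem.List.sorted
      ([some [5], some ([7] : List Int)].map (fun x => match x with | some l => (l.length : Int) | none => 0))
      (fun v => v) false = [1, 1] := by decide
  unfold get_length_of_missing_array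
  simp only [hs]
  rw [if_neg (by decide)]
  rw [pvLoopA]; decide

theorem pvB_w : get_length_of_missing_array_alt [some [5], some [7]] = 0 := by
  have hmap : ([some [5], some ([7] : List Int)].map (fun x => match x with | none => 0 | some l => (l.length : Int)))
      = [1, 1] := by decide
  unfold get_length_of_missing_array_alt
  simp only [hmap]
  rw [if_neg (by decide)]
  have hc : pvClimb (PySem.Set.ofList ([1, 1] : List Int)) ((PySem.List.min? ([1, 1] : List Int) (fun v => v)).getD 0) = 1 := by
    rw [pvClimb_eq]; decide
  rw [hc]
  decide

-- ===== VERDICT (by name: the statements are the Claim_ definitions above) =====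
theorem get_length_of_missing_array_spec : Claim_unchanged_get_length_of_missing_array := by
  intro array_of_arrays _ hnD
  by_cases hg : pvLens array_of_arrays = [] ∨ (0 : Int) ∈ pvLens array_of_arrays
  · obtain ⟨hA, hB⟩ := pv_guard array_of_arrays hg
    rw [hA, hB]
  · obtain ⟨hne, h0⟩ := not_or.mp hg
    obtain ⟨m, hm⟩ : ∃ m, PySem.List.min? (pvLens array_of_arrays) (fun v => v) = some m := by
      cases hmo : PySem.List.min? (pvLens array_of_arrays) (fun v => v) with
      | none => exact absurd ((PySem.List.min?_eq_none_iff _ _).mp hmo) hne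
      | some m => exact ⟨m, rfl⟩
    obtain ⟨M, hM⟩ : ∃ M, PySem.List.max? (pvLens array_of_arrays) (fun v => v) = some M := by
      cases hmo : PySem.List.max? (pvLens array_of_arrays) (fun v => v) with
      | none => exact absurd ((PySem.List.max?_eq_none_iff _ _).mp hmo) hne
      | some M => exact ⟨M, rfl⟩
    obtain ⟨hA, hB⟩ := pv_core array_of_arrays (pvLens array_of_arrays) rfl hne h0 m M hm hM
    rw [hA, hB]
    have hmemS : ∀ x : Int, x ∈ PySem.Set.ofList (pvLens array_of_arrays) ↔ x ∈ pvLens array_of_arrays := by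
      intro x; rw [PySem.Set.mem_ofList]
    have hmin : ∀ y ∈ pvLens array_of_arrays, m ≤ y := by
      have := PySem.List.min?_isMin hm; simpa using this
    have hmax : ∀ y ∈ pvLens array_of_arrays, y ≤ M := by
      have := PySem.List.max?_isMax hM; simpa using this
    have hk'len : pvClimb (PySem.Set.ofList (pvLens array_of_arrays)) m ∈ pvLens array_of_arrays :=
      (hmemS _).mp (pvClimb_mem _ m ((hmemS m).mpr (PySem.List.min?_mem hm)))
    have hiff : pvClimb (PySem.Set.ofList (pvLens array_of_arrays)) m = M ↔
        ∀ y ∈ pvLens array_of_arrays, y ≤ pvClimb (PySem.Set.ofList (pvLens array_of_arrays)) m :=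
      ⟨fun he y hy => he ▸ hmax y hy,
       fun hall => le_antisymm (hmax _ hk'len) (hall M (PySem.List.max?_mem hM))⟩
    by_cases hkM : pvClimb (PySem.Set.ofList (pvLens array_of_arrays)) m = M
    · rw [if_pos hkM]
      have hall := hiff.mp hkM
      have hcount : PySem.List.count (pvLens array_of_arrays)
          (pvClimb (PySem.Set.ofList (pvLens array_of_arrays)) m) = 1 := by
        by_contra hc
        apply hnD
        rw [pvD_iff]
        refine ⟨hne, h0, fun x hx => ?_⟩
        by_cases hxk : x = pvClimb (PySem.Set.ofList (pvLens array_of_arrays)) m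
        · right
          rw [hxk]
          refine ⟨hall, ?_⟩
          have hpos : 0 < List.count (pvClimb (PySem.Set.ofList (pvLens array_of_arrays)) m)
              (pvLens array_of_arrays) := List.count_pos_iff.mpr (hxk ▸ hx)
          rw [PySem.List.count_eq] at hc
          omega
        · left
          have hlt : x < pvClimb (PySem.Set.ofList (pvLens array_of_arrays)) m :=
            lt_of_le_of_ne (hall x hx) hxk
          have hx1 : x + 1 ∈ PySem.Set.ofList (pvLens array_of_arrays) :=
            pvClimb_covers _ m (x + 1) (by have := hmin x hx; omega) (by omega)
          exact (hmemS _).mp hx1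
      rw [if_pos ⟨hall, hcount⟩]
    · rw [if_neg hkM, if_neg (fun h => hkM (hiff.mpr h.1))]

theorem get_length_of_missing_array_changed : Claim_changed_get_length_of_missing_array := by
  unfold Claim_changed_get_length_of_missing_array
  exact ⟨by decide, by decide, pvA_w, pvB_w, by decide⟩

theorem get_length_of_missing_array_tight : Claim_exact_get_length_of_missing_array := by
  intro array_of_arrays _ hD
  obtain ⟨hne, h0, hrun⟩ := (pvD_iff array_of_arrays).mp hD
  obtain ⟨m, hm⟩ : ∃ m, PySem.List.min? (pvLens array_of_arrays) (fun v => v) = some m := by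
    cases hmo : PySem.List.min? (pvLens array_of_arrays) (fun v => v) with
    | none => exact absurd ((PySem.List.min?_eq_none_iff _ _).mp hmo) hne
    | some m => exact ⟨m, rfl⟩
  obtain ⟨M, hM⟩ : ∃ M, PySem.List.max? (pvLens array_of_arrays) (fun v => v) = some M := by
    cases hmo : PySem.List.max? (pvLens array_of_arrays) (fun v => v) with
    | none => exact absurd ((PySem.List.max?_eq_none_iff _ _).mp hmo) hne
    | some M => exact ⟨M, rfl⟩
  obtain ⟨hA, hB⟩ := pv_core array_of_arrays (pvLens array_of_arrays) rfl hne h0 m M hm hM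
  rw [hA, hB]
  have hmemS : ∀ x : Int, x ∈ PySem.Set.ofList (pvLens array_of_arrays) ↔ x ∈ pvLens array_of_arrays := by
    intro x; rw [PySem.Set.mem_ofList]
  have hmax : ∀ y ∈ pvLens array_of_arrays, y ≤ M := by
    have := PySem.List.max?_isMax hM; simpa using this
  have hk'len : pvClimb (PySem.Set.ofList (pvLens array_of_arrays)) m ∈ pvLens array_of_arrays :=
    (hmemS _).mp (pvClimb_mem _ m ((hmemS m).mpr (PySem.List.min?_mem hm)))
  have hstop : pvClimb (PySem.Set.ofList (pvLens array_of_arrays)) m + 1 ∉ pvLens array_of_arrays :=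
    fun h => pvClimb_stop _ m ((hmemS _).mpr h)
  have hkM : pvClimb (PySem.Set.ofList (pvLens array_of_arrays)) m = M := by
    rcases hrun _ hk'len with hsucc | ⟨hmx, _⟩
    · exact absurd hsucc hstop
    · exact le_antisymm (hmax _ hk'len) (hmx M (PySem.List.max?_mem hM))
  rw [hkM, if_pos rfl]
  have hcM : 1 < List.count M (pvLens array_of_arrays) := by
    rcases hrun M (PySem.List.max?_mem hM) with hsucc | ⟨_, hc⟩
    · have := hmax (M + 1) hsucc; omega
    · exact hc
  rw [if_neg (fun h => by rw [PySem.List.count_eq] at h; omega)]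
  have hMpos := pv_lengths_nonneg array_of_arrays M (PySem.List.max?_mem hM)
  omega
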